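-- pv_equiv track=rewrite | github.com/Sisyphe56/HLI_POC | llm_pipeline/docx_to_markdown.py | _grid_to_markdown
-- ===== SOURCE A (Python) =====
-- from typing import List, Optional, Tuple
--
-- def _grid_to_markdown(grid: List[List[str]], table_index: int) -> str:
--     """Render a 2D grid as a markdown pipe table."""
--     if not grid or not grid[0]:
--         return ''
--
--     n_cols = max(len(row) for row in grid)
--     # Normalize column count
--     for row in grid:
--         while len(row) < n_cols:
--             row.append('')
--
--     # Calculate column widths for alignment
--     col_widths = [3] * n_cols
--     for row in grid:
--         for i, cell in enumerate(row):
--             col_widths[i] = max(col_widths[i], len(cell))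
--
--     lines = [f'[TABLE {table_index}]']
--
--     for row_idx, row in enumerate(grid):
--         cells_str = ' | '.join(cell.ljust(col_widths[i]) for i, cell in enumerate(row))
--         lines.append(f'| {cells_str} |')
--         # Separator after first row (header)
--         if row_idx == 0:
--             sep = ' | '.join('-' * col_widths[i] for i in range(n_cols))
--             lines.append(f'| {sep} |')
--
--     return '\n'.join(lines)
-- ===== SOURCE B (Python) =====
-- def _grid_to_markdown(grid, table_index):
--     """Render a 2D grid as a markdown pipe table."""
--     if not grid or not grid[0]:
--         return ''
--
--     n_cols = max(len(row) for row in grid)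
--     # Same in-place row padding as the original (observable mutation preserved)
--     for row in grid:
--         while len(row) < n_cols:
--             row.append('')
--
--     # Column-major construction: transpose, finish each column (pad its cells to
--     # the column width and splice in its separator cell after the header cell),
--     # then transpose the finished columns back into lines.
--     out_cols = []
--     for col in zip(*grid):
--         w = max(3, max(len(c) for c in col))
--         padded = [c.ljust(w) for c in col]
--         out_cols.append([padded[0], '-' * w] + padded[1:])
--
--     lines = ['[TABLE %d]' % table_index]
--     for cells in zip(*out_cols):
--         lines.append('| ' + ' | '.join(cells) + ' |')
--     return '\n'.join(lines)
-- ===== Notes on version B (the rewrite author's own statement) =====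
-- stated objective: alternative
-- what changed: B works column-major via a transpose-process-transpose pipeline: it transposes the padded grid with zip(*grid), finishes each COLUMN independently (computes its width, left-justifies its cells and splices the '-'*w separator cell in after the header cell), then transposes the finished columns back with zip(*out_cols) and formats each resulting tuple as a line; A works row-major, folding widths row by row into an accumulator list and emitting lines in a single enumerate loop with an inline header branch.
import Mathlib
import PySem

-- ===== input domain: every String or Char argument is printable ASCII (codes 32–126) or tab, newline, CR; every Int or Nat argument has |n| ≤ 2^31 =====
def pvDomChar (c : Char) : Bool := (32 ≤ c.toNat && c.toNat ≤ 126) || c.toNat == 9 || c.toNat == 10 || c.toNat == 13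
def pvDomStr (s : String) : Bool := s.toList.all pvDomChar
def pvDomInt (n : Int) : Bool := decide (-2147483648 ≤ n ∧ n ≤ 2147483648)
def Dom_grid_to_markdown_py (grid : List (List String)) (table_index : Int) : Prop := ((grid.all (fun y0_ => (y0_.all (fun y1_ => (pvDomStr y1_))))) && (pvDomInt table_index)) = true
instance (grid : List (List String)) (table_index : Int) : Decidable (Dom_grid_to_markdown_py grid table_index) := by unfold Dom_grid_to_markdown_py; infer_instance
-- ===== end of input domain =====

-- B re-renders the same markdown table by a different algorithm shape: it transposes the
-- padded grid, finishes each COLUMN (width, ljust-padded cells, separator cell spliced in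
-- after the header cell) and transposes the finished columns back into lines, instead of
-- A's row-major width fold and single line loop with an inline header branch; both Pythons
-- pad `grid` in place identically, and the equivalence proved is about the return value.


-- helpers shared by both ports (both Pythons use these primitives verbatim):
-- cell.ljust(w) — exact: pads with spaces on the right, never truncates
def pvLjust (s : String) (w : Int) : String :=
  String.ofList (s.toList ++ List.replicate (w - (s.toList.length : Int)).toNat ' ')
-- '-' * w
def pvDashes (w : Int) : String := String.ofList (List.replicate w.toNat '-')
-- n_cols = max(len(row) for row in grid)  (grid nonempty at every use site, so getD 0 is never taken)
def pvNcols (grid : List (List String)) : Int :=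
  (PySem.List.max? (grid.map (fun row => (row.length : Int))) (fun x => x)).getD 0
-- the in-place padding loop: row.append('') until len(row) == n_cols
def pvPad (grid : List (List String)) (n : Int) : List (List String) :=
  grid.map (fun row => row ++ List.replicate (n - (row.length : Int)).toNat "")

-- ===== PORT A =====
-- A's row-major width accumulation: col_widths[i] = max(col_widths[i], len(cell))
def pvWidthsA (padded : List (List String)) (n : Int) : List Int :=
  padded.foldl (fun ws row =>
      (PySem.List.enumerate row 0).foldl
        (fun ws ic => ws.set ic.1.toNat (max (PySem.List.pyGetD ws ic.1 0) (PySem.Str.len ic.2))) ws)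
    (List.replicate n.toNat (3 : Int))

def pvRowA (cw : List Int) (row : List String) : String :=
  "| " ++ PySem.Str.join " | "
    ((PySem.List.enumerate row 0).map (fun ic => pvLjust ic.2 (PySem.List.pyGetD cw ic.1 0))) ++ " |"

def pvSepA (cw : List Int) (n : Int) : String :=
  "| " ++ PySem.Str.join " | "
    ((PySem.List.pyRange 0 n).map (fun i => pvDashes (PySem.List.pyGetD cw i 0))) ++ " |"

def grid_to_markdown_py (grid : List (List String)) (table_index : Int) : String :=
  match grid with
  | [] => ""
  | r0 :: _ =>
    if r0 = [] then "" else
      let n := pvNcols grid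
      let padded := pvPad grid n
      let cw := pvWidthsA padded n
      let lines := (PySem.List.enumerate padded 0).foldl
        (fun ls p =>
          let ls := ls ++ [pvRowA cw p.2]
          if p.1 == 0 then ls ++ [pvSepA cw n] else ls)
        ["[TABLE " ++ PySem.Int.toStr table_index ++ "]"]
      PySem.Str.join "\n" lines

-- ===== PORT B =====
-- zip(*m): exact index rendering of Python's zip over the rows of m
-- (truncates to the shortest row; [] for m = [])
def pvZipStar (m : List (List String)) : List (List String) :=
  match m with
  | [] => []
  | r0 :: rest =>
    (List.range (rest.foldl (fun a r => min a r.length) r0.length)).map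
      (fun i => m.map (fun r => r.getD i ""))

-- one finished column of B: w = max(3, max(len(c) for c in col));
-- padded = [c.ljust(w) for c in col]; [padded[0], '-'*w] + padded[1:]
-- (col is nonempty at every use site, so getD 0 is exactly padded[0])
def pvColOut (col : List String) : List String :=
  let w := max 3 ((PySem.List.max? (col.map (fun c => PySem.Str.len c)) (fun x => x)).getD 0)
  let padded := col.map (fun c => pvLjust c w)
  PySem.List.pyGetD padded 0 "" :: pvDashes w :: PySem.List.slice padded (some 1) none

def grid_to_markdown_py_alt (grid : List (List String)) (table_index : Int) : String :=
  match grid with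
  | [] => ""
  | r0 :: _ =>
    if r0 = [] then "" else
      let n := pvNcols grid
      let padded := pvPad grid n
      let out_cols := (pvZipStar padded).map pvColOut
      let lines := ("[TABLE " ++ PySem.Int.toStr table_index ++ "]")
        :: (pvZipStar out_cols).map (fun cells => "| " ++ PySem.Str.join " | " cells ++ " |")
      PySem.Str.join "\n" lines

-- ===== PRECONDITION & SPEC =====
def Spec_grid_to_markdown_py (grid : List (List String)) (table_index : Int) (out : String) : Prop := out = grid_to_markdown_py_alt grid table_index
instance (grid : List (List String)) (table_index : Int) (out : String) : Decidable (Spec_grid_to_markdown_py grid table_index out) := by unfold Spec_grid_to_markdown_py; infer_instance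

-- ===== CLAIM (what is proved, stated in full; the proofs are below) =====
def Claim_equal_grid_to_markdown_py : Prop := ∀ (grid : List (List String)) (table_index : Int), Dom_grid_to_markdown_py grid table_index → Spec_grid_to_markdown_py grid table_index (grid_to_markdown_py grid table_index)

-- ===== LEMMAS AND PROOFS =====

theorem pv_inner (row : List String) : ∀ (s : Nat) (ws : List Int), s + row.length ≤ ws.length →
  (PySem.List.enumerate row (s : Int)).foldl
    (fun ws ic => ws.set ic.1.toNat (max (PySem.List.pyGetD ws ic.1 0) (PySem.Str.len ic.2))) ws
  = ws.take s ++ List.zipWith (fun w c => max w (PySem.Str.len c)) (ws.drop s) row ++ ws.drop (s + row.length) := by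
  induction row with
  | nil => intro s ws h; simp
  | cons c t ih =>
    intro s ws h
    have hs : s < ws.length := by simp at h; omega
    rw [PySem.List.enumerate_cons]
    simp only [List.foldl_cons]
    have e1 : ((s : Int)).toNat = s := Int.toNat_natCast s
    rw [PySem.List.pyGetD_natCast, e1]
    have e2 : ((s : Int) + 1) = ((s + 1 : Nat) : Int) := by push_cast; ring
    rw [e2]
    set v := max (ws.getD s 0) (PySem.Str.len c) with hv
    rw [ih (s+1) (ws.set s v) (by rw [List.length_set]; simp at h; omega)]
    have hgd : ws.getD s 0 = ws[s] := List.getD_eq_getElem ws 0 hs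
    have h1 : (ws.set s v).take (s+1) = ws.take s ++ [v] := by
      apply List.ext_getElem (by simp; omega)
      intro k hk1 hk2
      simp only [List.getElem_take, List.getElem_set]
      by_cases hks : s = k
      · subst hks
        rw [List.getElem_append_right (by simp only [List.length_take]; omega)]
        simp
      · rw [List.getElem_append_left (by simp only [List.length_take]; simp at hk2; omega)]
        simp [hks]
    have h2 : ∀ m, s < m → (ws.set s v).drop m = ws.drop m := by
      intro m hm
      apply List.ext_getElem (by simp)
      intro k h1' h2'
      simp [List.getElem_drop, List.getElem_set]
      intro he; omega
    have h4 : ws.drop s = ws[s] :: ws.drop (s+1) := List.drop_eq_getElem_cons hs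
    rw [h1, h2 _ (by omega), h2 _ (by omega), h4, List.zipWith_cons_cons]
    have e3 : s + (c :: t).length = s + 1 + t.length := by simp; omega
    rw [e3, hv, hgd]
    simp

-- A's row-major fold, rewritten step-by-step as zipWith

theorem pv_foldA_eq_foldZip (rows : List (List String)) : ∀ (ws : List Int), (∀ r ∈ rows, r.length = ws.length) →
  rows.foldl (fun ws row =>
      (PySem.List.enumerate row 0).foldl
        (fun ws ic => ws.set ic.1.toNat (max (PySem.List.pyGetD ws ic.1 0) (PySem.Str.len ic.2))) ws) ws
  = rows.foldl (fun ws row => List.zipWith (fun w c => max w (PySem.Str.len c)) ws row) ws := by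
  induction rows with
  | nil => intro ws _; rfl
  | cons r rest ih =>
    intro ws hl
    simp only [List.foldl_cons]
    have hr : r.length = ws.length := hl r (List.mem_cons_self ..)
    have h0 := pv_inner r 0 ws (by omega)
    rw [show ((0:Nat):Int) = (0:Int) by norm_num] at h0
    rw [h0]
    simp only [List.take_zero, List.drop_zero, List.nil_append, hr, Nat.zero_add, List.drop_length, List.append_nil]
    apply ih
    intro r' hr'
    rw [List.length_zipWith, hr]
    simp [hl r' (List.mem_cons_of_mem _ hr')]

theorem pv_foldZip_getElem (rows : List (List String)) : ∀ (ws : List Int) (k : Nat) (_hk : k < ws.length),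
  (∀ r ∈ rows, r.length = ws.length) →
  (rows.foldl (fun ws row => List.zipWith (fun w c => max w (PySem.Str.len c)) ws row) ws).getD k 0
  = rows.foldl (fun a r => max a (PySem.Str.len (r.getD k ""))) (ws.getD k 0) := by
  induction rows with
  | nil => intro ws k _hk _; rfl
  | cons r rest ih =>
    intro ws k hk hl
    have hr : r.length = ws.length := hl r (List.mem_cons_self ..)
    simp only [List.foldl_cons]
    have hzl : (List.zipWith (fun w c => max w (PySem.Str.len c)) ws r).length = ws.length := by
      rw [List.length_zipWith, hr]; omega
    rw [ih _ k (by omega) (by intro r' hr'; rw [hzl]; exact hl r' (List.mem_cons_of_mem _ hr'))]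
    congr 1
    rw [List.getD_eq_getElem _ _ (by omega), List.getD_eq_getElem _ _ hk,
        List.getD_eq_getElem _ _ (by omega : k < r.length), List.getElem_zipWith]

-- the entries of A's width list
theorem pv_cwA_getD (padded : List (List String)) (n : Int)
    (hl : ∀ r ∈ padded, r.length = n.toNat) (k : Nat) (hk : k < n.toNat) :
    (pvWidthsA padded n).getD k 0
      = padded.foldl (fun a r => max a (PySem.Str.len (r.getD k ""))) 3 := by
  unfold pvWidthsA
  have hlr : ∀ r ∈ padded, r.length = (List.replicate n.toNat (3 : Int)).length := by
    intro r hr; rw [List.length_replicate]; exact hl r hr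
  rw [pv_foldA_eq_foldZip padded _ hlr,
      pv_foldZip_getElem padded _ k (by simpa using hk) hlr]
  congr 1
  exact (List.getD_eq_getElem _ _ (by simpa using hk)).trans (List.getElem_replicate ..)

-- fold-min over rows of constant length
theorem pv_foldl_min_const (L : List (List String)) (N : Nat)
    (h : ∀ r ∈ L, r.length = N) : L.foldl (fun a r => min a r.length) N = N := by
  induction L with
  | nil => rfl
  | cons r t ih =>
    simp only [List.foldl_cons, h r (List.mem_cons_self ..), min_self]
    exact ih (fun r' hr' => h r' (List.mem_cons_of_mem _ hr'))

-- zip(*m) on a rectangular nonempty m is the index transpose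
theorem pvZipStar_rect (m : List (List String)) (N : Nat) (hm : m ≠ [])
    (hl : ∀ r ∈ m, r.length = N) :
    pvZipStar m = (List.range N).map (fun i => m.map (fun r => r.getD i "")) := by
  cases m with
  | nil => exact absurd rfl hm
  | cons r0 rest =>
    show (List.range (rest.foldl (fun a r => min a r.length) r0.length)).map
        (fun i => (r0 :: rest).map (fun r => r.getD i "")) = _
    rw [hl r0 (List.mem_cons_self ..),
        pv_foldl_min_const rest N (fun r hr => hl r (List.mem_cons_of_mem _ hr))]

-- pulling a max out of a fold-max
theorem pv_foldl_max_left {a : Type} (ls : List a) (f : a -> Int) : forall (x c : Int),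
    ls.foldl (fun u y => max u (f y)) (max c x) = max c (ls.foldl (fun u y => max u (f y)) x) := by
  induction ls with
  | nil => intro x c; rfl
  | cons z t ih =>
    intro x c
    simp only [List.foldl_cons]
    rw [max_assoc c x (f z), ih]

-- B's per-column width equals A's fold over the rows of that column
theorem pv_w_eq (p0 : List String) (L : List (List String)) (i : Nat) :
    max 3 ((PySem.List.max?
        (((p0 :: L).map (fun r => r.getD i "")).map (fun c => PySem.Str.len c))
        (fun x => x)).getD 0)
    = (p0 :: L).foldl (fun a r => max a (PySem.Str.len (r.getD i ""))) 3 := by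
  simp only [List.map_cons, List.map_map]
  rw [PySem.List.max?_id_cons, Option.getD_some, List.foldl_cons, List.foldl_map]
  exact (pv_foldl_max_left L (fun r => PySem.Str.len (r.getD i "")) _ 3).symm

-- A's row line, re-indexed by range
theorem pv_rowA_range (cw : List Int) (row : List String) (N : Nat) (h : row.length = N) :
    pvRowA cw row = "| " ++ PySem.Str.join " | "
      ((List.range N).map (fun i => pvLjust (row.getD i "") (cw.getD i 0))) ++ " |" := by
  unfold pvRowA
  congr 3
  apply List.ext_getElem
  · simp [PySem.List.length_enumerate, h]
  · intro k hk1 hk2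
    have hk : k < row.length := by simpa [PySem.List.length_enumerate] using hk1
    rw [List.getElem_map, List.getElem_map, PySem.List.getElem_enumerate row 0 k
        (by simpa [PySem.List.length_enumerate] using hk)]
    simp only [List.getElem_range]
    rw [show (0 : Int) + (k : Nat) = ((k : Nat) : Int) by ring, PySem.List.pyGetD_natCast]
    rw [List.getD_eq_getElem _ _ hk]

-- A's separator line, re-indexed by range
theorem pv_sepA_range (cw : List Int) (n : Int) (hn : 0 ≤ n) :
    pvSepA cw n = "| " ++ PySem.Str.join " | "
      ((List.range n.toNat).map (fun i => pvDashes (cw.getD i 0))) ++ " |" := by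
  unfold pvSepA
  congr 3
  rw [show PySem.List.pyRange 0 n = PySem.List.pyRange 0 ((n.toNat : Nat) : Int) by
        rw [Int.toNat_of_nonneg hn]]
  rw [PySem.List.pyRange_zero_nat, List.map_map]
  apply List.ext_getElem
  · simp
  · intro k hk1 hk2
    simp only [List.getElem_map, List.getElem_range, Function.comp_apply]
    rw [PySem.List.pyGetD_natCast]

theorem pv_main_eq (grid : List (List String)) (ti : Int) :
    grid_to_markdown_py grid ti = grid_to_markdown_py_alt grid ti := by
  cases grid with
  | nil => rfl
  | cons r0 rest =>
    by_cases h0 : r0 = []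
    · simp [grid_to_markdown_py, grid_to_markdown_py_alt, h0]
    · simp only [grid_to_markdown_py, grid_to_markdown_py_alt, if_neg h0]
      set n := pvNcols (r0 :: rest) with hndef
      have hmax : n = (rest.map (fun row => (row.length : Int))).foldl max (r0.length : Int) := by
        rw [hndef]; unfold pvNcols
        rw [List.map_cons, PySem.List.max?_id_cons, Option.getD_some]
      have hub : ∀ row ∈ r0 :: rest, (row.length : Int) ≤ n := by
        intro row hrow
        rw [hmax]
        rcases List.mem_cons.mp hrow with h | h
        · subst h; exact (PySem.List.le_foldl_max _ _).1
        · exact (PySem.List.le_foldl_max _ _).2 _ (List.mem_map_of_mem h)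
      have hr0pos : (1 : Int) ≤ (r0.length : Int) := by
        have : r0.length ≠ 0 := fun he => h0 (List.eq_nil_of_length_eq_zero he)
        omega
      have hn1 : 1 ≤ n := le_trans hr0pos (hub r0 (List.mem_cons_self ..))
      have hn : 0 ≤ n := by omega
      have hplen : ∀ r ∈ pvPad (r0 :: rest) n, r.length = n.toNat := by
        intro r hr
        unfold pvPad at hr
        obtain ⟨row, hrow, rfl⟩ := List.mem_map.mp hr
        have := hub row hrow
        rw [List.length_append, List.length_replicate]
        omega
      set cw := pvWidthsA (pvPad (r0 :: rest) n) n with hcwdef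
      have hpad : pvPad (r0 :: rest) n
          = (r0 ++ List.replicate (n - (r0.length : Int)).toNat "") :: pvPad rest n := by
        unfold pvPad; rw [List.map_cons]
      set q0 := r0 ++ List.replicate (n - (r0.length : Int)).toNat "" with hq0def
      set Q := pvPad rest n with hQdef
      have hq0len : q0.length = n.toNat :=
        hplen q0 (by rw [hpad]; exact List.mem_cons_self ..)
      have hQlen : ∀ r ∈ Q, r.length = n.toNat := fun r hr =>
        hplen r (by rw [hpad]; exact List.mem_cons_of_mem _ hr)
      rw [hpad]
      -- A's line loop
      rw [PySem.List.enumerate_cons, List.foldl_cons]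
      simp only [show ((0:Int) == 0) = true from rfl, if_pos]
      rw [PySem.List.foldl_congr_mem (PySem.List.enumerate Q (0+1))
            _ (fun ls p => ls ++ [pvRowA cw p.2]) _
            (by
              intro acc p hp
              obtain ⟨k, hk, rfl⟩ := (PySem.List.mem_enumerate_iff _ _ _).mp hp
              have : ((0:Int) + 1 + (k : Nat) == 0) = false := by
                rw [beq_eq_false_iff_ne]; omega
              simp only [this, if_neg Bool.false_ne_true])]
      rw [PySem.List.foldl_append_singleton_eq_map (fun p : Int × List String => pvRowA cw p.2)]
      rw [show List.map (fun p : Int × List String => pvRowA cw p.2) (PySem.List.enumerate Q (0+1))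
            = List.map (pvRowA cw) Q by
          conv_rhs => rw [← PySem.List.map_snd_enumerate Q (0+1)]
          rw [List.map_map]
          rfl]
      -- B's side: transpose, per-column output, transpose back
      have hw : forall i, i < n.toNat ->
          max 3 ((PySem.List.max?
              ((((q0 :: Q).map (fun r => r.getD i "")).map (fun c => PySem.Str.len c)))
              (fun x => x)).getD 0) = cw.getD i 0 := by
        intro i hi
        rw [pv_w_eq q0 Q i, hcwdef, pv_cwA_getD _ n hplen i hi, hpad]
      -- step 1: the first transpose, on the rectangular padded grid
      have hz1 : pvZipStar (q0 :: Q)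
          = (List.range n.toNat).map (fun i => (q0 :: Q).map (fun r => r.getD i "")) :=
        pvZipStar_rect _ n.toNat (by simp) (by
          intro r hr
          rcases List.mem_cons.mp hr with h | h
          · subst h; exact hq0len
          · exact hQlen r h)
      -- the finished column i, written out
      have hcol : forall i, i < n.toNat ->
          pvColOut ((q0 :: Q).map (fun r => r.getD i ""))
          = pvLjust (q0.getD i "") (cw.getD i 0) :: pvDashes (cw.getD i 0)
              :: Q.map (fun r => pvLjust (r.getD i "") (cw.getD i 0)) := by
        intro i hi
        unfold pvColOut
        rw [hw i hi]
        simp only [List.map_cons, List.map_map,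
          PySem.List.pyGetD_zero_cons, PySem.List.slice_from_one, List.tail_cons]
        rfl
      have hz2 : (pvZipStar (q0 :: Q)).map pvColOut
          = (List.range n.toNat).map (fun i =>
              pvLjust (q0.getD i "") (cw.getD i 0) :: pvDashes (cw.getD i 0)
                :: Q.map (fun r => pvLjust (r.getD i "") (cw.getD i 0))) := by
        rw [hz1, List.map_map]
        apply List.map_congr_left
        intro i hi
        exact hcol i (List.mem_range.mp hi)
      -- step 2: the second transpose, column by column
      have hB : (pvZipStar ((List.range n.toNat).map (fun i =>
              pvLjust (q0.getD i "") (cw.getD i 0) :: pvDashes (cw.getD i 0)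
                :: Q.map (fun r => pvLjust (r.getD i "") (cw.getD i 0))))).map
            (fun cells => "| " ++ PySem.Str.join " | " cells ++ " |")
          = pvRowA cw q0 :: pvSepA cw n :: Q.map (pvRowA cw) := by
        set F : Nat -> List String := fun i =>
          pvLjust (q0.getD i "") (cw.getD i 0) :: pvDashes (cw.getD i 0)
            :: Q.map (fun r => pvLjust (r.getD i "") (cw.getD i 0)) with hFdef
        rw [pvZipStar_rect ((List.range n.toNat).map F) (Q.length + 2)
            (by
              intro h
              have := congrArg List.length h
              simp at this
              omega)
            (by
              intro r hr
              obtain ⟨i, _, rfl⟩ := List.mem_map.mp hr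
              simp [hFdef])]
        rw [List.map_map]
        apply List.ext_getElem (by simp)
        intro j hj1 hj2
        have hjlt : j < Q.length + 2 := by simpa using hj1
        simp only [List.getElem_map, List.getElem_range, Function.comp_apply, List.map_map]
        rcases j with _ | (_ | k)
        · -- header row
          rw [List.getElem_cons_zero, pv_rowA_range cw q0 n.toNat hq0len]
          rfl
        · -- separator row
          rw [List.getElem_cons_succ, List.getElem_cons_zero, pv_sepA_range cw n hn]
          rfl
        · -- data rows
          have hk : k < Q.length := by omega
          rw [List.getElem_cons_succ, List.getElem_cons_succ, List.getElem_map,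
              pv_rowA_range cw Q[k] n.toNat (hQlen _ (List.getElem_mem hk))]
          congr 3
          apply List.map_congr_left
          intro i _
          simp only [hFdef, Function.comp_apply, List.getD_cons_succ]
          rw [List.getD_eq_getElem _ _ (by simpa using hk), List.getElem_map]
      rw [hz2, hB]
      rfl

-- ===== VERDICT (by name: the statement is the Claim_ definition above) =====
theorem grid_to_markdown_py_spec : Claim_equal_grid_to_markdown_py := by
  intro grid table_index _
  unfold Spec_grid_to_markdown_py
  exact pv_main_eq grid table_index
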